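-- pv_equiv track=rewrite | github.com/thinhhoangpham/chirp_projection_analysis | chirp_python/hex_coordinates.py | get_hex_bounds
-- ===== SOURCE A (Python) =====
-- def get_hex_bounds(n_rings):
--     """
--     Get the bounds for a hexagonal grid with n_rings
--
--     Args:
--         n_rings: Number of rings around center (radius)
--
--     Returns:
--         List of (q, r) coordinates for all hexagons in the grid
--     """
--     hexagons = []
--     for q in range(-n_rings, n_rings + 1):
--         r1 = max(-n_rings, -q - n_rings)
--         r2 = min(n_rings, -q + n_rings)
--         for r in range(r1, r2 + 1):
--             hexagons.append((q, r))
--     return hexagons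
-- ===== SOURCE B (Python) =====
-- def get_hex_bounds(n_rings):
--     axis = range(-n_rings, n_rings + 1)
--     square = [(q, r) for q in axis for r in axis]
--     return [cell for cell in square if abs(cell[0] + cell[1]) <= n_rings]
-- ===== Notes on version B (the rewrite author's own statement) =====
-- stated objective: simpler
-- what changed: B first materialises the full (2n+1)x(2n+1) square of (q,r) pairs and then filters it by abs(q+r) <= n_rings in a second pass, instead of A's single nested loop with per-q analytic max/min r-bounds.
import Mathlib
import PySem

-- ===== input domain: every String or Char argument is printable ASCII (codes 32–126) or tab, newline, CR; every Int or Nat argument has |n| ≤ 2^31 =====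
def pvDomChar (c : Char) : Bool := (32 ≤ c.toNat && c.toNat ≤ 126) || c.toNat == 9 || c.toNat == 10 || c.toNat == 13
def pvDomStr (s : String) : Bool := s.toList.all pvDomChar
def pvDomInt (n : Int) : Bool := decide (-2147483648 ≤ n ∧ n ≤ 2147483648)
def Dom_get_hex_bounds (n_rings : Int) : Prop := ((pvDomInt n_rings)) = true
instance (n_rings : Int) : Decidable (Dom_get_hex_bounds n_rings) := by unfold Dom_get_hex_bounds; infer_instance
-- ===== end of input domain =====

-- B builds the whole square of pairs first and then filters it by |q+r| ≤ n_rings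
-- in a second pass, instead of A's per-q analytic max/min r-range; objective: simpler.

-- ===== PORT A =====
def get_hex_bounds (n_rings : Int) : List (Int × Int) :=
  (PySem.List.pyRange (-n_rings) (n_rings + 1) 1).foldl
    (fun hexagons q =>
      let r1 := max (-n_rings) (-q - n_rings)
      let r2 := min n_rings (-q + n_rings)
      (PySem.List.pyRange r1 (r2 + 1) 1).foldl
        (fun acc r => acc ++ [(q, r)]) hexagons)
    []

-- ===== PORT B =====
def get_hex_bounds_alt (n_rings : Int) : List (Int × Int) :=
  let axis := PySem.List.pyRange (-n_rings) (n_rings + 1) 1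
  let square := axis.flatMap (fun q => axis.map (fun r => (q, r)))
  square.filter (fun cell => decide (|cell.1 + cell.2| ≤ n_rings))

-- ===== PRECONDITION & SPEC =====
def Spec_get_hex_bounds (n_rings : Int) (out : List (Int × Int)) : Prop := out = get_hex_bounds_alt n_rings
instance (n_rings : Int) (out : List (Int × Int)) : Decidable (Spec_get_hex_bounds n_rings out) := by unfold Spec_get_hex_bounds; infer_instance

-- ===== CLAIM (what is proved, stated in full; the proofs are below) =====
def Claim_equal_get_hex_bounds : Prop := ∀ (n_rings : Int), Dom_get_hex_bounds n_rings → Spec_get_hex_bounds n_rings (get_hex_bounds n_rings)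

-- ===== LEMMAS AND PROOFS =====

-- For each q, A's analytic r-range equals the full axis filtered by |q+r| ≤ n.
theorem pv_inner_eq (n q : Int) :
    PySem.List.pyRange (max (-n) (-q - n)) (min n (-q + n) + 1) 1
      = (PySem.List.pyRange (-n) (n + 1) 1).filter (fun r => decide (|q + r| ≤ n)) := by
  have hperm : (PySem.List.pyRange (max (-n) (-q - n)) (min n (-q + n) + 1) 1).Perm
      ((PySem.List.pyRange (-n) (n + 1) 1).filter (fun r => decide (|q + r| ≤ n))) := by
    rw [List.perm_ext_iff_of_nodup (PySem.List.nodup_pyRange_one _ _)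
      ((PySem.List.nodup_pyRange_one _ _).filter _)]
    intro x
    simp only [PySem.List.mem_pyRange_one, List.mem_filter, decide_eq_true_eq, abs_le]
    omega
  exact hperm.eq_of_pairwise (fun a b _ _ h h' => absurd h' (lt_asymm h))
    (PySem.List.pairwise_lt_pyRange_one _ _)
    ((PySem.List.pairwise_lt_pyRange_one _ _).filter _)

-- ===== VERDICT (by name: the statement is the Claim_ definition above) =====
theorem get_hex_bounds_spec : Claim_equal_get_hex_bounds := by
  intro n _
  unfold Spec_get_hex_bounds get_hex_bounds get_hex_bounds_alt
  simp only [PySem.List.foldl_append_singleton_eq_map]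
  rw [PySem.List.foldl_append_eq_flatMap, List.nil_append, List.filter_flatMap]
  refine List.flatMap_congr ?_
  intro q _
  rw [List.filter_map, pv_inner_eq]
  simp only [Function.comp_def]
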